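-- pv_equiv track=rewrite | github.com/ShenglingZHU/hiera-tf | packages/htf-py/htf/viz/multi_timeframe_plot.py | _truthy_windows
-- ===== SOURCE A (Python) =====
-- from collections.abc import Mapping, Sequence
-- from typing import Any
--
-- def _truthy_windows(flags: Sequence[bool], xs: Sequence[Any]) -> list[tuple[Any, Any]]:
--     """
--     Collapse consecutive True values into (start, end) windows.
--     """
--     windows: list[tuple[Any, Any]] = []
--     start = None
--     for idx, flag in enumerate(flags):
--         if bool(flag):
--             if start is None:
--                 start = xs[idx]
--         else:
--             if start is not None:
--                 end_val = xs[idx - 1] if idx > 0 else start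
--                 windows.append((start, end_val))
--                 start = None
--     if start is not None and xs:
--         windows.append((start, xs[-1]))
--     return windows
-- ===== SOURCE B (Python) =====
-- from itertools import groupby
--
--
-- def _truthy_windows(flags, xs):
--     windows = []
--     for key, group in groupby(enumerate(flags), key=lambda t: bool(t[1])):
--         if key:
--             idxs = [i for i, _ in group]
--             windows.append((xs[idxs[0]], xs[idxs[-1]]))
--     return windows
-- ===== Notes on version B (the rewrite author's own statement) =====
-- stated objective: idiomatic
-- what changed: B replaces A's start-sentinel state machine (a flag carried across the loop, closed on the next False or after the loop) by itertools.groupby over enumerate(flags): each maximal True run is one group and the window is (xs[first], xs[last]) of that run; Pre_ excludes inputs whose flags end in a True run while len(xs) differs from len(flags) -- misaligned parallel arrays on which A's xs[-1] closing reads an element at no flag index, a corner where either reading is defensible (B indexes by the run's last flag index and raises when xs is shorter).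
-- outside the precondition, e.g. on _truthy_windows([True], [5, 7]): A returns [(5, 7)], B returns [(5, 5)]; on _truthy_windows([True, True], [3]): A returns [(3, 3)], B raises IndexError
import Mathlib
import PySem

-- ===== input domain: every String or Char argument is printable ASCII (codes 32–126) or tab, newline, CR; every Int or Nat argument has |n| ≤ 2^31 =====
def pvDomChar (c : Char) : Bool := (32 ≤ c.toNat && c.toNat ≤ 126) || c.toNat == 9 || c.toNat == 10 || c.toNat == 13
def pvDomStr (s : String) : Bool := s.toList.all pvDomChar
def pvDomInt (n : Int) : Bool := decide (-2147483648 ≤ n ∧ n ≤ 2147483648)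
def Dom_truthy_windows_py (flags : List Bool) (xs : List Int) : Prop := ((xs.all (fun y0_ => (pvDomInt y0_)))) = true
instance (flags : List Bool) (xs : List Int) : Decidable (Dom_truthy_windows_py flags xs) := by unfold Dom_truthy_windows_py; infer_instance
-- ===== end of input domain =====

-- B re-implements A's start-sentinel state machine as a groupby over maximal runs of equal
-- flags (idiomatic, same O(n) cost); equivalence is proved on Pre_.

-- ===== PORT A =====
-- xs[i]: pyGet? none = IndexError; Pre_ excludes those inputs, so the .getD default is never taken there
def pvGeti (xs : List Int) (i : Int) : Int := (PySem.List.pyGet? xs i).getD 0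

-- the body of A's 'for idx, flag in enumerate(flags)' loop, state = (windows, start)
def aStep (xs : List Int) (acc : List (Int × Int) × Option Int) (p : Int × Bool) :
    List (Int × Int) × Option Int :=
  if p.2 then
    match acc.2 with
    | none => (acc.1, some (pvGeti xs p.1))
    | some s => (acc.1, some s)
  else
    match acc.2 with
    | some s => (acc.1 ++ [(s, if p.1 > 0 then pvGeti xs (p.1 - 1) else s)], none)
    | none => (acc.1, none)

-- the trailing 'if start is not None and xs: windows.append((start, xs[-1]))' after the loop
def pvFinish (xs : List Int) (st : List (Int × Int) × Option Int) : List (Int × Int) :=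
  match st.2 with
  | some s => if xs ≠ [] then st.1 ++ [(s, pvGeti xs (-1))] else st.1
  | none => st.1

def truthy_windows_py (flags : List Bool) (xs : List Int) : List (Int × Int) :=
  pvFinish xs ((PySem.List.enumerate flags 0).foldl (aStep xs) ([], none))

-- ===== PORT B =====
-- itertools.groupby(l, key = second component): list of (key, group) pairs
def pyGroupRuns : List (Int × Bool) → List (Bool × List (Int × Bool))
  | [] => []
  | p :: rest =>
    (p.2, p :: rest.takeWhile (fun q => q.2 == p.2)) ::
      pyGroupRuns (rest.dropWhile (fun q => q.2 == p.2))
termination_by l => l.length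
decreasing_by
  simpa using Nat.lt_succ_of_le (List.length_dropWhile_le _ _)

-- the body of Source B's loop over the groups (idxs[0]/idxs[-1]: groups are nonempty by
-- construction, so the D-defaults of headD/getLastD are never taken)
def bStep (xs : List Int) (windows : List (Int × Int)) (g : Bool × List (Int × Bool)) :
    List (Int × Int) :=
  if g.1 then
    let idxs := g.2.map Prod.fst
    windows ++ [(pvGeti xs (idxs.headD 0), pvGeti xs (idxs.getLastD 0))]
  else windows

def truthy_windows_py_alt (flags : List Bool) (xs : List Int) : List (Int × Int) :=
  (pyGroupRuns (PySem.List.enumerate flags 0)).foldl (bStep xs) []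

-- ===== PRECONDITION & SPEC =====
-- Pre_ = the inputs where A's reads of xs are all in range (elsewhere A raises IndexError),
-- MINUS the inputs whose flags end in a True run while xs.length ≠ flags.length: on those
-- misaligned parallel arrays A closes the trailing run with xs[-1], an element at no flag
-- index — a corner where either value is defensible — while B indexes by the run's last flag
-- index (and raises when xs is shorter).
def Pre_truthy_windows_py (flags : List Bool) (xs : List Int) : Prop :=
  (∀ i : Nat, i < flags.length → flags.getD i false = true →
    ((i = 0 ∨ flags.getD (i - 1) false = false) ∨
     (i + 1 < flags.length ∧ flags.getD (i + 1) false = false)) →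
    (i : Int) < xs.length) ∧
  (flags.getLast? = some true → xs.length = flags.length)
instance (flags : List Bool) (xs : List Int) : Decidable (Pre_truthy_windows_py flags xs) := by
  unfold Pre_truthy_windows_py; infer_instance

def pvWitness_truthy_windows_py : List Bool × List Int := ([true, true, false, true], [10, 20, 30, 40])

def Spec_truthy_windows_py (flags : List Bool) (xs : List Int) (out : List (Int × Int)) : Prop := out = truthy_windows_py_alt flags xs
instance (flags : List Bool) (xs : List Int) (out : List (Int × Int)) : Decidable (Spec_truthy_windows_py flags xs out) := by unfold Spec_truthy_windows_py; infer_instance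

-- ===== CLAIM (what is proved, stated in full; the proofs are below) =====
def Claim_equal_truthy_windows_py : Prop := ∀ (flags : List Bool) (xs : List Int), Dom_truthy_windows_py flags xs → Pre_truthy_windows_py flags xs → Spec_truthy_windows_py flags xs (truthy_windows_py flags xs)

-- ===== LEMMAS AND PROOFS =====

-- A's loop as a structural recursion producing the windows directly (start carried as state)
def gA (xs : List Int) : Int → List Bool → Option Int → List (Int × Int)
  | _, [], none => []
  | _, [], some s => if xs ≠ [] then [(s, pvGeti xs (-1))] else []
  | n, f :: fs, st =>
    if f then
      match st with
      | none => gA xs (n + 1) fs (some (pvGeti xs n))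
      | some s => gA xs (n + 1) fs (some s)
    else
      match st with
      | some s => (s, if n > 0 then pvGeti xs (n - 1) else s) :: gA xs (n + 1) fs none
      | none => gA xs (n + 1) fs none

-- B's loop as a recursion over maximal runs
def gB (xs : List Int) : Int → List Bool → List (Int × Int)
  | _, [] => []
  | n, f :: fs =>
    let t := fs.takeWhile (fun b => b == f)
    let r := fs.dropWhile (fun b => b == f)
    if f then
      (pvGeti xs n, pvGeti xs (n + (t.length : Int))) :: gB xs (n + 1 + t.length) r
    else gB xs (n + 1 + t.length) r
termination_by _ l => l.length
decreasing_by
  all_goals simpa using Nat.lt_succ_of_le (List.length_dropWhile_le _ _)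

-- what B still emits when A's state is 'start = some s' with the next index n
def gOpen (xs : List Int) (s n : Int) (flags : List Bool) : List (Int × Int) :=
  let t := flags.takeWhile (fun b => b == true)
  (s, pvGeti xs (n - 1 + (t.length : Int))) ::
    gB xs (n + t.length) (flags.dropWhile (fun b => b == true))

lemma bridgeA_aux (xs : List Int) :
    ∀ (flags : List Bool) (n : Int) (w : List (Int × Int)) (st : Option Int),
      pvFinish xs ((PySem.List.enumerate flags n).foldl (aStep xs) (w, st))
      = w ++ gA xs n flags st := by
  intro flags
  induction flags with
  | nil =>
    intro n w st
    cases st with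
    | none => simp [PySem.List.enumerate_nil, pvFinish, gA]
    | some s =>
      by_cases hxs : xs = [] <;> simp [PySem.List.enumerate_nil, pvFinish, gA, hxs]
  | cons f fs ih =>
    intro n w st
    rw [PySem.List.enumerate_cons, List.foldl_cons]
    cases f with
    | true =>
      cases st with
      | none => rw [show aStep xs (w, none) (n, true) = (w, some (pvGeti xs n)) from rfl, ih]
                simp [gA]
      | some s => rw [show aStep xs (w, some s) (n, true) = (w, some s) from rfl, ih]
                  simp [gA]
    | false =>
      cases st with
      | none => rw [show aStep xs (w, none) (n, false) = (w, none) from rfl, ih]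
                simp [gA]
      | some s =>
        rw [show aStep xs (w, some s) (n, false)
              = (w ++ [(s, if n > 0 then pvGeti xs (n - 1) else s)], none) from rfl, ih]
        simp [gA]

lemma bridgeA (flags : List Bool) (xs : List Int) :
    truthy_windows_py flags xs = gA xs 0 flags none := by
  have h := bridgeA_aux xs flags 0 [] none
  simpa [truthy_windows_py] using h

lemma takeWhile_enum (b : Bool) :
    ∀ (fs : List Bool) (n : Int),
      (PySem.List.enumerate fs n).takeWhile (fun q => q.2 == b)
        = PySem.List.enumerate (fs.takeWhile (fun x => x == b)) n := by
  intro fs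
  induction fs with
  | nil => intro n; simp [PySem.List.enumerate_nil]
  | cons f fs ih =>
    intro n
    by_cases hf : f = b
    · subst hf
      simp [PySem.List.enumerate_cons, List.takeWhile_cons, ih]
    · have : (f == b) = false := by simp [hf]
      simp [PySem.List.enumerate_cons, List.takeWhile_cons, this]

lemma dropWhile_enum (b : Bool) :
    ∀ (fs : List Bool) (n : Int),
      (PySem.List.enumerate fs n).dropWhile (fun q => q.2 == b)
        = PySem.List.enumerate (fs.dropWhile (fun x => x == b))
            (n + ((fs.takeWhile (fun x => x == b)).length : Int)) := by
  intro fs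
  induction fs with
  | nil => intro n; simp [PySem.List.enumerate_nil]
  | cons f fs ih =>
    intro n
    by_cases hf : f = b
    · subst hf
      rw [PySem.List.enumerate_cons]
      rw [List.dropWhile_cons_of_pos (by simp), List.dropWhile_cons_of_pos (by simp)]
      rw [ih]
      congr 1
      simp [List.takeWhile_cons]
      push_cast
      ring
    · have hfb : (f == b) = false := by simp [hf]
      rw [PySem.List.enumerate_cons]
      rw [List.dropWhile_cons_of_neg (by simp [hfb]), List.dropWhile_cons_of_neg (by simp [hfb])]
      simp [List.takeWhile_cons, hfb]

lemma groupRuns_enum (f : Bool) (fs : List Bool) (n : Int) :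
    pyGroupRuns (PySem.List.enumerate (f :: fs) n)
      = (f, PySem.List.enumerate (f :: fs.takeWhile (fun x => x == f)) n) ::
          pyGroupRuns (PySem.List.enumerate (fs.dropWhile (fun x => x == f))
            (n + 1 + ((fs.takeWhile (fun x => x == f)).length : Int))) := by
  rw [PySem.List.enumerate_cons, pyGroupRuns]
  rw [show ((n, f) : Int × Bool).2 = f from rfl]
  rw [takeWhile_enum f fs (n + 1), dropWhile_enum f fs (n + 1)]
  rw [PySem.List.enumerate_cons]

lemma lastD_map_fst_enum :
    ∀ (l : List Bool) (x : Bool) (n d : Int),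
      (((PySem.List.enumerate (x :: l) n).map Prod.fst).getLastD d) = n + (l.length : Int) := by
  intro l
  induction l with
  | nil => intro x n d; simp [PySem.List.enumerate_cons, PySem.List.enumerate_nil]
  | cons y l ih =>
    intro x n d
    rw [PySem.List.enumerate_cons, List.map_cons, List.getLastD_cons]
    have h := ih y (n + 1) n
    rw [h]
    simp only [List.length_cons]
    push_cast
    ring

lemma bridgeB_aux (xs : List Int) :
    ∀ (m : Nat) (flags : List Bool), flags.length ≤ m →
      ∀ (n : Int) (w : List (Int × Int)),
        (pyGroupRuns (PySem.List.enumerate flags n)).foldl (bStep xs) w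
          = w ++ gB xs n flags := by
  intro m
  induction m with
  | zero =>
    intro flags hlen n w
    have : flags = [] := List.eq_nil_of_length_eq_zero (Nat.le_zero.mp hlen)
    subst this
    simp [PySem.List.enumerate_nil, pyGroupRuns, gB]
  | succ m ih =>
    intro flags hlen n w
    cases flags with
    | nil => simp [PySem.List.enumerate_nil, pyGroupRuns, gB]
    | cons f fs =>
      rw [groupRuns_enum, List.foldl_cons]
      have hrec : (fs.dropWhile (fun x => x == f)).length ≤ m := by
        have h1 : (fs.dropWhile (fun x => x == f)).length ≤ fs.length :=
          List.length_dropWhile_le _ _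
        simp at hlen; omega
      rw [ih _ hrec]
      cases f with
      | false =>
        rw [show bStep xs w (false, PySem.List.enumerate
              (false :: fs.takeWhile (fun x => x == false)) n) = w from rfl]
        rw [gB]
        simp
      | true =>
        rw [gB]
        simp only [if_pos rfl]
        have hhead : ((PySem.List.enumerate (true :: fs.takeWhile (fun x => x == true)) n).map
            Prod.fst).headD 0 = n := by
          simp [PySem.List.enumerate_cons]
        have hlast := lastD_map_fst_enum (fs.takeWhile (fun x => x == true)) true n 0
        rw [show bStep xs w (true, PySem.List.enumerate
              (true :: fs.takeWhile (fun x => x == true)) n)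
            = w ++ [(pvGeti xs (((PySem.List.enumerate
                (true :: fs.takeWhile (fun x => x == true)) n).map Prod.fst).headD 0),
              pvGeti xs (((PySem.List.enumerate
                (true :: fs.takeWhile (fun x => x == true)) n).map Prod.fst).getLastD 0))]
            from rfl]
        rw [hhead, hlast]
        simp

lemma bridgeB (flags : List Bool) (xs : List Int) :
    truthy_windows_py_alt flags xs = gB xs 0 flags := by
  have h := bridgeB_aux xs flags.length flags le_rfl 0 []
  simpa [truthy_windows_py_alt] using h

-- gB skips a False run one element at a time as well as in one step
lemma gB_cons_false (xs : List Int) (n : Int) (fs : List Bool) :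
    gB xs n (false :: fs) = gB xs (n + 1) fs := by
  cases fs with
  | nil => simp [gB]
  | cons f' fs' =>
    cases f' with
    | true =>
      rw [gB.eq_def]
      simp
    | false =>
      rw [gB.eq_def]
      conv_rhs => rw [gB.eq_def]
      simp only [List.takeWhile_cons, List.dropWhile_cons]
      simp
      congr 1
      push_cast
      ring

-- xs[-1] is xs[len(xs)-1] on a nonempty xs
lemma pvGeti_neg_one (xs : List Int) (hxs : xs ≠ []) :
    pvGeti xs (-1) = pvGeti xs ((xs.length : Int) - 1) := by
  have h1 : PySem.List.pyGet? xs (-1) = xs.getLast? := PySem.List.pyGet?_neg_one xs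
  have h0 : (0 : Int) ≤ (xs.length : Int) - 1 := by
    have : xs.length ≠ 0 := by simpa using hxs
    omega
  have h2 : PySem.List.pyGet? xs ((xs.length : Int) - 1)
      = xs[((xs.length : Int) - 1).toNat]? := PySem.List.pyGet?_of_nonneg _ h0
  have h3 : ((xs.length : Int) - 1).toNat = xs.length - 1 := by omega
  rw [pvGeti, pvGeti, h1, h2, h3, List.getLast?_eq_getElem?]

-- main equivalence of the two loop shapes, for nonempty xs; hL says that whenever the last
-- flag is True (so A closes the trailing run with xs[-1]) the lists are aligned
lemma gA_eq_gB (xs : List Int) (hxs : xs ≠ []) :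
    ∀ (flags : List Bool) (n : Int) (st : Option Int),
      (flags.getLast? = some true → n + (flags.length : Int) = (xs.length : Int)) →
      (st.isSome → flags = [] → n = (xs.length : Int)) →
      0 ≤ n → (st.isSome → 1 ≤ n) →
      gA xs n flags st
        = match st with
          | none => gB xs n flags
          | some s => gOpen xs s n flags := by
  intro flags
  induction flags with
  | nil =>
    intro n st hlast hend hn hst
    cases st with
    | none => simp [gA, gB]
    | some s =>
      have hnN : n = (xs.length : Int) := hend rfl rfl
      simp only [gA, gOpen, if_pos hxs]
      rw [pvGeti_neg_one xs hxs, hnN]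
      simp [gB]
  | cons f fs ih =>
    intro n st hlast hend hn hst
    have hlast' : fs.getLast? = some true → (n + 1) + (fs.length : Int) = (xs.length : Int) := by
      intro h
      cases fs with
      | nil => simp at h
      | cons g gs =>
        have := hlast (by rwa [List.getLast?_cons_cons])
        simp only [List.length_cons] at this ⊢
        push_cast at this ⊢
        omega
    cases f with
    | true =>
      have hend' : fs = [] → (n + 1) = (xs.length : Int) := by
        intro hfs
        subst hfs
        exact hlast (by simp)
      cases st with
      | none =>
        have h := ih (n + 1) (some (pvGeti xs n)) hlast' (fun _ h => hend' h)
          (by omega) (fun _ => by omega)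
        rw [show gA xs n (true :: fs) none = gA xs (n + 1) fs (some (pvGeti xs n)) from by
              simp [gA], h]
        simp only [gOpen]
        conv_rhs => rw [gB.eq_def]
        simp only [List.takeWhile_cons, List.dropWhile_cons, if_true]
        simp only [show ∀ b : Bool, (b == true) = b from by decide]
        push_cast
        ring_nf
      | some s =>
        have h := ih (n + 1) (some s) hlast' (fun _ h => hend' h) (by omega) (fun _ => by omega)
        rw [show gA xs n (true :: fs) (some s) = gA xs (n + 1) fs (some s) from by simp [gA], h]
        simp only [gOpen, List.takeWhile_cons, List.dropWhile_cons, List.length_cons]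
        simp only [show (true == true) = true from rfl, if_true, List.length_cons]
        push_cast
        ring_nf
    | false =>
      cases st with
      | none =>
        have h := ih (n + 1) none hlast' (by simp) (by omega) (by simp)
        rw [show gA xs n (false :: fs) none = gA xs (n + 1) fs none from by simp [gA], h]
        rw [gB_cons_false]
      | some s =>
        have hn1 : 1 ≤ n := hst rfl
        have h := ih (n + 1) none hlast' (by simp) (by omega) (by simp)
        rw [show gA xs n (false :: fs) (some s)
              = (s, if n > 0 then pvGeti xs (n - 1) else s) :: gA xs (n + 1) fs none from by
              simp [gA], h]
        simp only [gOpen, List.takeWhile_cons, List.dropWhile_cons]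
        rw [if_pos (show n > 0 by omega)]
        simp only [show ((false : Bool) == true) = false from rfl, Bool.false_eq_true,
          if_false, List.length_nil, Nat.cast_zero, add_zero, sub_add_cancel]
        rw [gB_cons_false xs n fs]

-- with empty xs, Pre_ forces all flags False …
lemma pre_empty_all_false (flags : List Bool)
    (h : Pre_truthy_windows_py flags []) : ∀ b ∈ flags, b = false := by
  by_contra hcon
  push_neg at hcon
  obtain ⟨b, hb, hbt⟩ := hcon
  have hbt' : b = true := by cases b <;> simp_all
  subst hbt'
  obtain ⟨i, hi, hget⟩ := List.mem_iff_getElem.mp hb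
  have hex : ∃ j, j < flags.length ∧ flags.getD j false = true :=
    ⟨i, hi, by simp [List.getD_eq_getElem?_getD, List.getElem?_eq_getElem hi, hget]⟩
  classical
  let j := Nat.find hex
  have hj := Nat.find_spec hex
  have hmin : ∀ k, k < j → ¬(k < flags.length ∧ flags.getD k false = true) :=
    fun k hk => Nat.find_min hex hk
  have hstart : j = 0 ∨ flags.getD (j - 1) false = false := by
    rcases Nat.eq_zero_or_pos j with h0 | hpos
    · exact Or.inl h0
    · right
      have hlt : j - 1 < j := by omega
      have := hmin (j - 1) hlt
      have hlen : j - 1 < flags.length := by omega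
      cases hgd : flags.getD (j - 1) false with
      | false => rfl
      | true => exact absurd ⟨hlen, hgd⟩ this
  have := h.1 j hj.1 hj.2 (Or.inl hstart)
  simp only [List.length_nil] at this
  omega

-- … and then both loops emit nothing
lemma gA_all_false (xs : List Int) :
    ∀ (flags : List Bool), (∀ b ∈ flags, b = false) → ∀ n, gA xs n flags none = [] := by
  intro flags
  induction flags with
  | nil => intro _ n; simp [gA]
  | cons f fs ih =>
    intro hall n
    have hf : f = false := hall f (by simp)
    subst hf
    rw [show gA xs n (false :: fs) none = gA xs (n + 1) fs none from by simp [gA]]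
    exact ih (fun b hb => hall b (by simp [hb])) (n + 1)

lemma gB_all_false (xs : List Int) (flags : List Bool)
    (hall : ∀ b ∈ flags, b = false) : ∀ n, gB xs n flags = [] := by
  intro n
  cases flags with
  | nil => simp [gB]
  | cons f fs =>
    have hf : f = false := hall f (by simp)
    subst hf
    rw [gB]
    have hdrop : fs.dropWhile (fun b => b == false) = [] := by
      rw [List.dropWhile_eq_nil_iff]
      intro x hx
      simp [hall x (by simp [hx])]
    simp only [if_neg (by simp : ¬ (false = true)), hdrop]
    rw [gB]

-- ===== VERDICT (by name: the statement is the Claim_ definition above) =====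
theorem truthy_windows_py_spec : Claim_equal_truthy_windows_py := by
  intro flags xs _ hpre
  unfold Spec_truthy_windows_py
  rw [bridgeA, bridgeB]
  by_cases hxs : xs = []
  · subst hxs
    have hall := pre_empty_all_false flags hpre
    rw [gA_all_false [] flags hall 0, gB_all_false [] flags hall 0]
  · have hlast0 : flags.getLast? = some true → (0 : Int) + (flags.length : Int) = (xs.length : Int) := by
      intro h
      have := hpre.2 h
      omega
    have h := gA_eq_gB xs hxs flags 0 none hlast0 (by simp) le_rfl (by simp)
    simpa using h
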